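-- pv_equiv track=rewrite | github.com/Rick00Kim/SkillUp_Coding | Algorithm/UsingPython/basic_algorithm/task.py | solution
-- ===== SOURCE A (Python) =====
-- def solution(A, debug):
--
--     set_duplicated = list(set(A))
--     A.sort()
--
--     if len(A) == 1:
--         return -1
--
--     counted_dict = {}
--
--     for e in set_duplicated:
--         counted_dict[e] = A.count(e)
--
--     max_element = max(counted_dict.values())
--     max_duplicate = 0
--
--     for k, v in counted_dict.items():
--
--         if v == max_element:
--             max_duplicate += 1
--             result = k
--
--         if max_duplicate > 1:
--             return -1
--
--     return result
-- ===== SOURCE B (Python) =====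
-- def solution(A, debug):
--     A.sort()
--     if len(A) == 1:
--         return -1
--     best_val = -1
--     best_len = 0
--     tie = False
--     i = 0
--     n = len(A)
--     while i < n:
--         j = i + 1
--         while j < n and A[j] == A[i]:
--             j += 1
--         run = j - i
--         if run > best_len:
--             best_len = run
--             best_val = A[i]
--             tie = False
--         elif run == best_len:
--             tie = True
--         i = j
--     return -1 if tie else best_val
-- ===== Notes on version B (the rewrite author's own statement) =====
-- stated objective: faster
-- what changed: B replaces A's set+dict counting pass (which calls A.count once per distinct element, quadratic on distinct-heavy lists) by a single two-pointer run scan over the sorted list that tracks the best run value, its length and a tie flag.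
-- outside the precondition, e.g. on solution([], False): A raises ValueError, B returns -1
import Mathlib
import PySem

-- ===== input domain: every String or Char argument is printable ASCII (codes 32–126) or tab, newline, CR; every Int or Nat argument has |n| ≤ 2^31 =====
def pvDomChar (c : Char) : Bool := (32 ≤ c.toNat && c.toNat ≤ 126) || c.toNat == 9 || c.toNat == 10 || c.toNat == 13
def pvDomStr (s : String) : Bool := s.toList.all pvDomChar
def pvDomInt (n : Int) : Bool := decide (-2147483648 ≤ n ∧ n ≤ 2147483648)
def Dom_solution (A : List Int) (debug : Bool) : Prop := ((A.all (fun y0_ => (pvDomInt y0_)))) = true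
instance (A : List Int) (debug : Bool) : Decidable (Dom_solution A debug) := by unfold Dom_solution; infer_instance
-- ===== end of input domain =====

-- B replaces A's per-distinct-element counting pass by a single run scan over the sorted list
-- (objective: faster). Both A and B sort the argument list in place in Python; the equivalence
-- proved here is about the return value.


-- ===== PORT A =====
-- the 'for k, v in counted_dict.items()' loop with the early 'return -1'
def solutionLoop : List (Int × Int) → Int → Int → Int → Int
  | [], _, _, result => result
  | (k, v) :: rest, maxElement, maxDup, result =>
    let maxDup' := if v == maxElement then maxDup + 1 else maxDup
    let result' := if v == maxElement then k else result
    if maxDup' > 1 then -1 else solutionLoop rest maxElement maxDup' result'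

def solution (A : List Int) (debug : Bool) : Int :=
  let set_duplicated : List Int := PySem.Set.ofList A
  let As := PySem.List.sorted A (fun x => x) false     -- A.sort(): subsequent uses of A read the sorted list
  if As.length == 1 then -1
  else
    let counted : PySem.Dict Int Int :=
      set_duplicated.foldl (fun d e => d.insert e ((PySem.List.count As e : Int))) PySem.Dict.empty
    match PySem.List.max? counted.values (fun v => v) with
    | none => -1   -- Python raises ValueError here (only for A = []); excluded by Pre_solution
    | some maxElement => solutionLoop counted.items maxElement 0 0
      -- Python's 'result' starts unassigned; it is always assigned before use (the max is attained),
      -- the initial 0 here is never returned on Pre_solution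

-- ===== PORT B =====
-- the outer 'while i < n' loop; the inner 'while j < n and A[j] == A[i]' is the takeWhile/dropWhile split
def solutionAltLoop (xs : List Int) (bestVal bestLen : Int) (tie : Bool) : Int :=
  match xs with
  | [] => if tie then -1 else bestVal
  | x :: rest =>
    let run : Int := 1 + ((rest.takeWhile (fun y => y == x)).length : Int)
    let rest' := rest.dropWhile (fun y => y == x)
    if bestLen < run then solutionAltLoop rest' x run false
    else if run == bestLen then solutionAltLoop rest' bestVal bestLen true
    else solutionAltLoop rest' bestVal bestLen tie
termination_by xs.length
decreasing_by
  all_goals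
    simp only [List.length_cons]
    exact Nat.lt_succ_of_le (List.length_dropWhile_le _ _)

def solution_alt (A : List Int) (debug : Bool) : Int :=
  let As := PySem.List.sorted A (fun x => x) false     -- A.sort()
  if As.length == 1 then -1
  else solutionAltLoop As (-1) 0 false

-- ===== PRECONDITION & SPEC =====
-- Pre_ excludes only the empty list, on which A raises ValueError (max() of an empty sequence).
def Pre_solution (A : List Int) (debug : Bool) : Prop := A ≠ []
instance (A : List Int) (debug : Bool) : Decidable (Pre_solution A debug) := by unfold Pre_solution; infer_instance
def pvWitness_solution : List Int × Bool := ([1, 2, 2], false)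

def Spec_solution (A : List Int) (debug : Bool) (out : Int) : Prop := out = solution_alt A debug
instance (A : List Int) (debug : Bool) (out : Int) : Decidable (Spec_solution A debug out) := by unfold Spec_solution; infer_instance

-- ===== CLAIM (what is proved, stated in full; the proofs are below) =====
def Claim_equal_solution : Prop := ∀ (A : List Int) (debug : Bool), Dom_solution A debug → Pre_solution A debug → Spec_solution A debug (solution A debug)

-- ===== LEMMAS AND PROOFS =====

-- A's item loop once max_duplicate = 1: any further hit returns -1
lemma solutionLoop_one (items : List (Int × Int)) (M res : Int) :
    solutionLoop items M 1 res =
      if items.filter (fun p => p.2 == M) = [] then res else -1 := by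
  induction items generalizing res with
  | nil => simp [solutionLoop]
  | cons p rest ih =>
    obtain ⟨k, v⟩ := p
    by_cases hv : v = M
    · simp [solutionLoop, hv]
    · rw [List.filter_cons]
      simp only [solutionLoop, hv, ih, beq_iff_eq, ite_false, gt_iff_lt]
      norm_num

-- A's item loop from the initial state: the hits decide the result
lemma solutionLoop_zero (items : List (Int × Int)) (M res : Int) :
    solutionLoop items M 0 res =
      match items.filter (fun p => p.2 == M) with
      | [] => res
      | [p] => p.1
      | _ :: _ :: _ => -1 := by
  induction items generalizing res with
  | nil => simp [solutionLoop]
  | cons p rest ih =>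
    obtain ⟨k, v⟩ := p
    by_cases hv : v = M
    · simp only [solutionLoop, hv, List.filter_cons]
      norm_num
      rw [solutionLoop_one]
      cases h : rest.filter (fun p => p.2 == M) <;> simp
    · rw [List.filter_cons]
      simp [solutionLoop, hv, ih]

-- the run decomposition B's scan walks through (proof-only helper)
def pvRuns : List Int → List (Int × Int)
  | [] => []
  | x :: rest =>
    (x, 1 + ((rest.takeWhile (fun y => y == x)).length : Int)) :: pvRuns (rest.dropWhile (fun y => y == x))
termination_by xs => xs.length
decreasing_by
  simp only [List.length_cons]
  exact Nat.lt_succ_of_le (List.length_dropWhile_le _ _)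

-- B's scan in terms of the run list of its argument
lemma solutionAltLoop_spec (xs : List Int) (bv bl : Int) (tie : Bool) :
    solutionAltLoop xs bv bl tie =
      (let M := ((pvRuns xs).map (·.2)).foldl max bl
       let hits := (pvRuns xs).filter (fun p => p.2 == M)
       if bl = M then (if hits = [] ∧ tie = false then bv else -1)
       else match hits with
            | [] => bv
            | [p] => p.1
            | _ :: _ :: _ => -1) := by
  induction xs using pvRuns.induct generalizing bv bl tie with
  | case1 =>
    simp only [pvRuns, List.map_nil, List.foldl_nil, List.filter_nil, solutionAltLoop]
    cases tie <;> simp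
  | case2 x rest ih =>
    have hone : (1:Int) ≤ 1 + ((rest.takeWhile (fun y => y == x)).length : Int) := by omega
    rw [solutionAltLoop]
    simp only []
    set run : Int := 1 + ((rest.takeWhile (fun y => y == x)).length : Int) with hrun
    set rest' := rest.dropWhile (fun y => y == x) with hrest'
    have hrp : pvRuns (x :: rest) = (x, run) :: pvRuns rest' := by rw [pvRuns]
    rw [hrp]
    simp only [List.map_cons, List.foldl_cons, List.filter_cons]
    by_cases h1 : bl < run
    · rw [if_pos h1, ih, max_eq_right (le_of_lt h1)]
      set M := ((pvRuns rest').map (·.2)).foldl max run with hM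
      have hrM : run ≤ M := (PySem.List.le_foldl_max _ _).1
      have hblM : bl ≠ M := by omega
      rw [if_neg hblM]
      by_cases h2 : run = M
      · rw [if_pos h2]
        simp only [h2, beq_self_eq_true, if_true]
        cases hh : (pvRuns rest').filter (fun p => p.2 == M) <;> simp
      · rw [if_neg h2, if_neg (by simp [h2] : ¬ (run == M) = true)]
        have hmem := PySem.List.foldl_max_mem ((pvRuns rest').map (·.2)) run
        have hne : (pvRuns rest').filter (fun p => p.2 == M) ≠ [] := by
          rcases hmem with h | h
          · exact absurd (hM.trans h).symm h2
          · obtain ⟨p, hp, hp2⟩ := List.mem_map.mp h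
            intro hc
            have hf : p ∈ (pvRuns rest').filter (fun p => p.2 == M) :=
              List.mem_filter.mpr ⟨hp, by simp [hp2, hM.symm]⟩
            rw [hc] at hf
            exact absurd hf (List.not_mem_nil)
        cases hh : (pvRuns rest').filter (fun p => p.2 == M) with
        | nil => exact absurd hh hne
        | cons q t => cases t <;> rfl
    · rw [if_neg h1]
      by_cases h2 : run = bl
      · simp only [h2, beq_self_eq_true, if_true]
        rw [ih, max_self]
        set M := ((pvRuns rest').map (·.2)).foldl max bl with hM
        by_cases h3 : bl = M
        · simp [h3]
        · simp only [if_neg h3, if_neg (by simp [h3] : ¬ (bl == M) = true)]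
      · have h3 : run < bl := by
          rcases lt_trichotomy bl run with h | h | h
          · exact absurd h h1
          · exact absurd h.symm h2
          · exact h
        rw [if_neg (by simpa using h2), ih, max_eq_left (le_of_lt h3)]
        set M := ((pvRuns rest').map (·.2)).foldl max bl with hM
        have hblM : bl ≤ M := (PySem.List.le_foldl_max _ _).1
        have hrM : ¬ (run == M) = true := by simp; omega
        rw [if_neg hrM]

-- on a sorted list the runs are the distinct values with their multiplicities
lemma pvRuns_sorted_spec (xs : List Int) (h : xs.Pairwise (· ≤ ·)) :
    ((pvRuns xs).map (·.1)).Nodup ∧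
    (∀ v, v ∈ (pvRuns xs).map (·.1) ↔ v ∈ xs) ∧
    (∀ p ∈ pvRuns xs, p.2 = (xs.count p.1 : Int)) := by
  induction xs using pvRuns.induct with
  | case1 => simp [pvRuns]
  | case2 x rest ih =>
    rw [List.pairwise_cons] at h
    obtain ⟨hx_le, hrp⟩ := h
    set t := rest.takeWhile (fun y => y == x) with ht
    set d := rest.dropWhile (fun y => y == x) with hd
    have hrest : t ++ d = rest := List.takeWhile_append_dropWhile
    have hdsub : d.Sublist rest := List.dropWhile_sublist _
    have hd_pair : d.Pairwise (· ≤ ·) := hrp.sublist hdsub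
    have ht_eq : ∀ y ∈ t, y = x := by
      intro y hy
      have := List.mem_takeWhile_imp hy
      simpa using this
    have hd_gt : ∀ y ∈ d, x < y := by
      intro y hy
      cases hdc : d with
      | nil => rw [hdc] at hy; exact absurd hy (List.not_mem_nil)
      | cons h0 d' =>
        have hdne : rest.dropWhile (fun y => y == x) ≠ [] := by rw [← hd, hdc]; simp
        have hh0 : ¬ (h0 == x) = true := by
          have h1 := List.head_dropWhile_not (fun y => y == x) hdne
          have h2 : (rest.dropWhile (fun y => y == x)).head hdne = h0 := by
            have : rest.dropWhile (fun y => y == x) = h0 :: d' := by rw [← hd, hdc]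
            simp [this]
          rw [h2] at h1
          simp [h1]
        have hx0 : x < h0 := by
          have hmem : h0 ∈ rest := hdsub.subset (hdc ▸ List.mem_cons_self)
          have := hx_le h0 hmem
          simp at hh0
          omega
        rw [hdc] at hy
        rcases List.mem_cons.mp hy with rfl | hy'
        · exact hx0
        · have : h0 ≤ y := by
            rw [hdc] at hd_pair
            exact (List.pairwise_cons.mp hd_pair).1 y hy'
          omega
    have hxd : x ∉ d := fun hc => lt_irrefl x (hd_gt x hc)
    obtain ⟨ihn, ihm, ihc⟩ := ih hd_pair
    have hrw : pvRuns (x :: rest) = (x, 1 + (t.length : Int)) :: pvRuns d := by rw [pvRuns]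
    rw [hrw]
    refine ⟨?_, ?_, ?_⟩
    · simp only [List.map_cons, List.nodup_cons]
      refine ⟨fun hc => ?_, ihn⟩
      have := (ihm x).mp hc
      exact absurd this hxd
    · intro v
      simp only [List.map_cons, List.mem_cons, ihm]
      constructor
      · rintro (rfl | hv)
        · exact Or.inl rfl
        · exact Or.inr (hrest ▸ List.mem_append.mpr (Or.inr hv))
      · intro hv
        rcases hv with rfl | hv'
        · exact Or.inl rfl
        · rw [← hrest] at hv'
          rcases List.mem_append.mp hv' with hvt | hvd
          · exact Or.inl (ht_eq v hvt)
          · exact Or.inr hvd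
    · intro p hp
      rcases List.mem_cons.mp hp with rfl | hp'
      · simp only []
        have hcx : (x :: rest).count x = 1 + t.length := by
          rw [List.count_cons_self, ← hrest, List.count_append]
          have h1 : t.count x = t.length := List.count_eq_length.mpr (fun b hb => (ht_eq b hb).symm)
          have h2 : d.count x = 0 := List.count_eq_zero.mpr hxd
          omega
        rw [hcx]
        push_cast
        ring
      · have hc := ihc p hp'
        have hp1 : p.1 ∈ d := (ihm p.1).mp (List.mem_map.mpr ⟨p, hp', rfl⟩)
        have hgt := hd_gt p.1 hp1
        have hcount : (x :: rest).count p.1 = d.count p.1 := by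
          have hstep : (x :: rest).count p.1 = rest.count p.1 := by
            rw [List.count_cons]
            simp [show ¬(x = p.1) by omega]
          rw [hstep, ← hrest, List.count_append]
          have h1 : t.count p.1 = 0 := List.count_eq_zero.mpr (fun hc' => by
            have := ht_eq p.1 hc'; omega)
          omega
        rw [hcount, hc]

-- the assembled equivalence
lemma solution_eq_alt (A : List Int) (debug : Bool) (hA : A ≠ []) :
    solution A debug = solution_alt A debug := by
  simp only [solution, solution_alt, PySem.List.count_eq]
  set As := PySem.List.sorted A (fun x => x) false with hAs
  by_cases hlen : (As.length == 1) = true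
  · rw [if_pos hlen, if_pos hlen]
  · rw [if_neg hlen, if_neg hlen]
    set D : List Int := PySem.Set.ofList A with hD
    have hDnodup : D.Nodup := PySem.Set.nodup_ofList A
    have hDmem : ∀ v, v ∈ D ↔ v ∈ A := fun v => PySem.Set.mem_ofList A v
    have hAsm : ∀ v, v ∈ As ↔ v ∈ A := fun v => PySem.List.mem_sorted A _ false v
    -- the dict built by the counting loop
    have hitems : (D.foldl (fun d e => d.insert e ((As.count e : Int))) PySem.Dict.empty).items
        = D.map (fun e => (e, (As.count e : Int))) := by
      have := PySem.Dict.items_foldl_insert_fresh D (fun a => a) (fun a => (As.count a : Int))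
        PySem.Dict.empty (fun a _ => by simp [PySem.Dict.contains_empty]) (by simpa using hDnodup)
      simpa using this
    have hvalues : (D.foldl (fun d e => d.insert e ((As.count e : Int))) PySem.Dict.empty).values
        = D.map (fun e => (As.count e : Int)) := by
      simp only [PySem.Dict.values, hitems, List.map_map]
      rfl
    rw [hvalues, hitems]
    -- A is nonempty, so the values list is nonempty and max? returns some M
    cases hmax : PySem.List.max? (D.map (fun e => (As.count e : Int))) (fun v => v) with
    | none =>
      rw [PySem.List.max?_eq_none_iff] at hmax
      obtain ⟨a, ha⟩ := List.exists_mem_of_ne_nil A hA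
      have hDe : D = [] := by simpa using hmax
      exact absurd ((hDmem a).mpr ha) (by simp [hDe])
    | some M =>
    have hMmem := PySem.List.max?_mem hmax
    have hMmax := PySem.List.max?_isMax hmax
    obtain ⟨e₀, he₀D, he₀M⟩ := List.mem_map.mp hMmem
    have he₀As : e₀ ∈ As := (hAsm e₀).mpr ((hDmem e₀).mp he₀D)
    have he₀cnt : 1 ≤ As.count e₀ := List.one_le_count_iff.mpr he₀As
    -- B side: run decomposition of the sorted list
    have hpair : As.Pairwise (· ≤ ·) := PySem.List.sorted_pairwise A (fun x => x)
    obtain ⟨hn, hm, hc⟩ := pvRuns_sorted_spec As hpair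
    set runs := pvRuns As with hruns
    set E : List Int := runs.map (·.1) with hE
    have hEcnt : ∀ v ∈ E, ((As.count v : Int)) ∈ runs.map (·.2) := by
      intro v hv
      obtain ⟨p, hp, hp1⟩ := List.mem_map.mp hv
      exact List.mem_map.mpr ⟨p, hp, by rw [hc p hp, hp1]⟩
    have hMB := PySem.List.le_foldl_max (runs.map (·.2)) 0
    set MB : Int := (runs.map (·.2)).foldl max 0 with hMBdef
    -- MB = M
    have hMBM : MB = M := by
      have h1 : (As.count e₀ : Int) ≤ MB := hMB.2 _ (hEcnt e₀ ((hm e₀).mpr he₀As))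
      have h2 : MB ≤ M := by
        rcases PySem.List.foldl_max_mem (runs.map (·.2)) 0 with h | h
        · rw [hMBdef, h]; omega
        · obtain ⟨p, hp, hp2⟩ := List.mem_map.mp h
          have hp1E : p.1 ∈ E := List.mem_map.mpr ⟨p, hp, rfl⟩
          have hp1D : p.1 ∈ D := (hDmem p.1).mpr ((hAsm p.1).mp ((hm p.1).mp hp1E))
          have := hMmax _ (List.mem_map.mpr ⟨p.1, hp1D, rfl⟩)
          rw [hMBdef, ← hp2, hc p hp]
          exact this
      omega
    have hMB1 : (1:Int) ≤ MB := le_trans (by exact_mod_cast he₀cnt) (hMB.2 _ (hEcnt e₀ ((hm e₀).mpr he₀As)))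
    -- rewrite both loops
    show solutionLoop (D.map (fun e => (e, ((List.count e As : Nat) : Int)))) M 0 0
        = solutionAltLoop As (-1) 0 false
    rw [solutionLoop_zero, solutionAltLoop_spec]
    simp only [← hruns, ← hMBdef, hMBM]
    rw [if_neg (by omega : ¬ (0:Int) = M)]
    -- runs is the map of its key list
    have hruns_eq : runs = E.map (fun v => (v, (As.count v : Int))) := by
      rw [hE, List.map_map]
      have : runs.map ((fun v => (v, (As.count v : Int))) ∘ (·.1)) = runs := by
        conv_rhs => rw [← List.map_id runs]
        exact List.map_congr_left (fun p hp => by rw [Function.comp_apply, ← hc p hp]; rfl)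
      exact this.symm
    -- both hit lists are key-filters
    have hfilA : (D.map (fun e => (e, (As.count e : Int)))).filter (fun p => p.2 == M)
        = (D.filter (fun e => (As.count e : Int) == M)).map (fun e => (e, (As.count e : Int))) := by
      rw [List.filter_map]; rfl
    have hfilB : runs.filter (fun p => p.2 == M)
        = (E.filter (fun e => (As.count e : Int) == M)).map (fun e => (e, (As.count e : Int))) := by
      rw [hruns_eq, List.filter_map]; rfl
    rw [hfilA, hfilB]
    obtain ⟨KA, hKA⟩ : ∃ l, l = D.filter (fun e => (As.count e : Int) == M) := ⟨_, rfl⟩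
    obtain ⟨KB, hKB⟩ : ∃ l, l = E.filter (fun e => (As.count e : Int) == M) := ⟨_, rfl⟩
    rw [← hKA, ← hKB]
    have hperm : KA.Perm KB := by
      rw [hKA, hKB, List.perm_ext_iff_of_nodup (hDnodup.filter _) (hn.filter _)]
      intro v
      simp [List.mem_filter, hDmem, hAsm, hm]
    have hKAne : KA ≠ [] := by
      have : e₀ ∈ KA := by
        rw [hKA]
        exact List.mem_filter.mpr ⟨he₀D, by simp [he₀M]⟩
      intro hc'; rw [hc'] at this; exact absurd this (List.not_mem_nil)
    clear hKA hKB
    cases KA with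
    | nil => exact absurd rfl hKAne
    | cons e1 tl =>
      cases tl with
      | nil =>
        have hone : KB = [e1] := List.perm_singleton.mp hperm.symm
        rw [hone]
        simp
      | cons e2 tl2 =>
        have hlen2 : 2 ≤ KB.length := by
          have := hperm.length_eq
          simp only [List.length_cons] at this
          omega
        cases KB with
        | nil => simp at hlen2
        | cons f1 t2 =>
          cases t2 with
          | nil => simp at hlen2
          | cons f2 t3 => simp

-- ===== VERDICT (by name: the statement is the Claim_ definition above) =====
theorem solution_spec : Claim_equal_solution :=
  fun A debug _ hPre => solution_eq_alt A debug hPre
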